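-- pv_equiv track=rewrite | github.com/polmf/-Cocke-Kasami-Younger | CKY_cnf.py | simplificar_gramatica
-- ===== SOURCE A (Python) =====
-- def simplificar_gramatica(init_symbol, gramatica):
--     """
--     Aquesta funció s'encarrega d'ordenar la gramàtica i que s'hagi generat tot correctament
--
--     Parameters:
--         init_symbol (str): Símbol inicial
--         gramatica (dict): Diccionari de la gramàtica
--
--     Returns:
--         dict: Retorna la gramàtica simplificada
--     """
--     reglas_identicas = {}
--     for clave, reglas in list(gramatica.items()):
--         reglas_tupla = tuple(tuple(regla) for regla in reglas) # Convertir a tupla per poder comparar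
--         if reglas_tupla not in reglas_identicas: # Si no s'ha vist abans, es guarda
--             reglas_identicas[reglas_tupla] = clave
--         else: # Si ja s'ha vist abans, es reemplaça per la clau existent
--             clave_existente = reglas_identicas[reglas_tupla]
--             for c, rs in gramatica.items(): # Reemplaçar la clau en totes les regles
--                 gramatica[c] = [[clave_existente if s == clave else s for s in regla] for regla in rs]
--             del gramatica[clave] # Eliminar la clau actual
--
--     # Elimina las claus no utilitzades
--     # Elimina las claus no utilitzades
--     usados = {init_symbol}
--     cambio = True
--     while cambio: # Mentre hi hagi canvis
--         cambio = False
--         for clave, reglas in gramatica.items(): # Recorrer totes les regles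
--             for regla in reglas:
--                 for simbolo in regla:
--                     if simbolo in gramatica and simbolo not in usados: # Si el símbol no s'ha vist abans
--                         usados.add(simbolo) # Afegir-lo a la llista de símbols vistos
--                         cambio = True
--
--     for clave in list(gramatica.keys()):
--         if clave not in usados: # Si la clau no s'ha vist abans, eliminar-la
--             del gramatica[clave]
--
--     return gramatica
-- ===== SOURCE B (Python) =====
-- def simplificar_gramatica(init_symbol, gramatica):
--     # Merge duplicate rule-sets by grouping keys on their original rules, then
--     # apply the resulting rename map in one pass; compute used symbols in one
--     # scan instead of a fixpoint loop. Returns a NEW dict (A mutates and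
--     # returns its argument; the equivalence is about the return value).
--     rep = {}      # original rules (as tuple) -> first key having them
--     rename = {}   # duplicate key -> representative key
--     for clave, reglas in gramatica.items():
--         t = tuple(tuple(regla) for regla in reglas)
--         if t in rep:
--             rename[clave] = rep[t]
--         else:
--             rep[t] = clave
--     merged = {clave: [[rename.get(s, s) for s in regla] for regla in reglas]
--               for clave, reglas in gramatica.items() if clave not in rename}
--     usados = {init_symbol}
--     for reglas in merged.values():
--         for regla in reglas:
--             for s in regla:
--                 if s in merged:
--                     usados.add(s)
--     return {clave: reglas for clave, reglas in merged.items() if clave in usados}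
-- ===== Notes on version B (the rewrite author's own statement) =====
-- stated objective: faster
-- what changed: B groups keys by their original rule-set once to build a rename map applied in a single pass (instead of A's per-duplicate whole-grammar substitution rescans) and computes the used-symbol set in one scan instead of A's while-changed fixpoint loop; B returns a new dict rather than mutating the argument.
import Mathlib
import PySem

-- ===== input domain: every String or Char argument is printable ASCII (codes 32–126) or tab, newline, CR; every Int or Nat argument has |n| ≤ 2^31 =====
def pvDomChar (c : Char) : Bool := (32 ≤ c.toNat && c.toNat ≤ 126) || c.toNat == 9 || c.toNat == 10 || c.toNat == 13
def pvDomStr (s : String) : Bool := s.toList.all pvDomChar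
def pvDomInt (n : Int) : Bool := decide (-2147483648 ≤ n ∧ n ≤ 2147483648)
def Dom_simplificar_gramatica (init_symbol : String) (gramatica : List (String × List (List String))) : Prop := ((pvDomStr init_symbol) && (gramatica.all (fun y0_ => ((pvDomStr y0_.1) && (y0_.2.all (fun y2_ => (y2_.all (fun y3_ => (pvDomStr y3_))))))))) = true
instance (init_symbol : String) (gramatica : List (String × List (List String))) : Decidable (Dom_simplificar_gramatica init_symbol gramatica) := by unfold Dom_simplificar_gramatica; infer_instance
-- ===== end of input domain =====

-- B merges duplicate rule-sets with a precomputed rename map applied in one pass and computes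
-- the used-symbol set in one scan instead of A's mutate-and-rescan fixpoint; A mutates its
-- argument in place, B builds a new dict — the equivalence proved is about the return value.

-- ===== PORT A =====
-- [clave_existente if s == clave else s for s in regla] for regla in reglas
def pvSubstReglas (clave ex : String) (reglas : List (List String)) : List (List String) :=
  reglas.map (fun regla => regla.map (fun s => if s == clave then ex else s))

-- first loop of A: merge keys whose (original) rule lists are identical, substituting and deleting in place
def pvPhase1 (snapshot : List (String × List (List String)))
    (g : PySem.Dict String (List (List String)))
    (ri : PySem.Dict (List (List String)) String) : PySem.Dict String (List (List String)) :=
  match snapshot with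
  | [] => g
  | (clave, reglas) :: rest =>
    match ri.get? reglas with
    | none => pvPhase1 rest g (ri.insert reglas clave)
    | some ex =>
      let g' := g.items.foldl
        (fun acc p => acc.insert p.1 (pvSubstReglas clave ex p.2)) g
      pvPhase1 rest (g'.erase clave) ri

-- one sweep of A's while-body over all rules, threading (usados, cambio)
def pvPass (g : PySem.Dict String (List (List String)))
    (st : PySem.Set String × Bool) : PySem.Set String × Bool :=
  g.items.foldl (fun st p =>
    p.2.foldl (fun st regla =>
      regla.foldl (fun st simbolo =>
        if g.contains simbolo && !(PySem.Set.contains st.1 simbolo)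
        then (PySem.Set.add st.1 simbolo, true) else st) st) st) st

-- A's 'while cambio' loop; the fuel argument is only a totality guard (the loop
-- stabilises after one sweep, see pvWhile_eq below), it never runs out
def pvWhile (g : PySem.Dict String (List (List String))) :
    Nat → PySem.Set String → PySem.Set String
  | 0, usados => usados
  | n + 1, usados =>
    let st := pvPass g (usados, false)
    if st.2 then pvWhile g n st.1 else st.1

def simplificar_gramatica (init_symbol : String) (gramatica : List (String × List (List String))) : List (String × List (List String)) :=
  let d := PySem.Dict.ofList gramatica
  let g := pvPhase1 d.items d PySem.Dict.empty
  let usados := pvWhile g (g.size + 2) (PySem.Set.ofList [init_symbol])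
  (g.keys.foldl (fun acc clave =>
    if PySem.Set.contains usados clave then acc else acc.erase clave) g).items

-- ===== PORT B =====
-- [[rename.get(s, s) for s in regla] for regla in reglas]
def pvApplyRename (rename : PySem.Dict String String) (reglas : List (List String)) : List (List String) :=
  reglas.map (fun regla => regla.map (fun s => rename.getD s s))

-- B's grouping pass: (rep : rules -> first key, rename : duplicate key -> representative)
def pvGroup (st : PySem.Dict (List (List String)) String × PySem.Dict String String)
    (p : String × List (List String)) :
    PySem.Dict (List (List String)) String × PySem.Dict String String :=
  match st.1.get? p.2 with
  | some r => (st.1, st.2.insert p.1 r)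
  | none => (st.1.insert p.2 p.1, st.2)

def simplificar_gramatica_alt (init_symbol : String) (gramatica : List (String × List (List String))) : List (String × List (List String)) :=
  let d := PySem.Dict.ofList gramatica
  let rename := (d.items.foldl pvGroup (PySem.Dict.empty, PySem.Dict.empty)).2
  let merged := (d.items.filter (fun p => !(rename.contains p.1))).map
    (fun p => (p.1, pvApplyRename rename p.2))
  let mergedD := PySem.Dict.mk merged
  let usados := merged.foldl (fun u p =>
    p.2.foldl (fun u regla =>
      regla.foldl (fun u s =>
        if mergedD.contains s then PySem.Set.add u s else u) u) u)
    (PySem.Set.ofList [init_symbol])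
  merged.filter (fun p => PySem.Set.contains usados p.1)

-- ===== PRECONDITION & SPEC =====
def Spec_simplificar_gramatica (init_symbol : String) (gramatica : List (String × List (List String))) (out : List (String × List (List String))) : Prop := out = simplificar_gramatica_alt init_symbol gramatica
instance (init_symbol : String) (gramatica : List (String × List (List String))) (out : List (String × List (List String))) : Decidable (Spec_simplificar_gramatica init_symbol gramatica out) := by unfold Spec_simplificar_gramatica; infer_instance

-- ===== CLAIM (what is proved, stated in full; the proofs are below) =====
def Claim_equal_simplificar_gramatica : Prop := ∀ (init_symbol : String) (gramatica : List (String × List (List String))), Dom_simplificar_gramatica init_symbol gramatica → Spec_simplificar_gramatica init_symbol gramatica (simplificar_gramatica init_symbol gramatica)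

-- ===== LEMMAS AND PROOFS =====

-- B's merged grammar, as a function of the rename map (definitionally B's `merged`)
def pvMerged (m : PySem.Dict String String) (l : List (String × List (List String))) : List (String × List (List String)) :=
  (l.filter (fun p => !(m.contains p.1))).map (fun p => (p.1, pvApplyRename m p.2))

-- all symbols occurring in rule bodies, in traversal order
def pvSyms (l : List (String × List (List String))) : List String :=
  ((l.map Prod.snd).flatten).flatten

-- B's inner used-symbol step
def pvBstep (c : String → Bool) (u : PySem.Set String) (s : String) : PySem.Set String :=
  if c s then PySem.Set.add u s else u

-- A's inner used-symbol step (threads the cambio flag)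
def pvAstep (c : String → Bool) (st : PySem.Set String × Bool) (s : String) : PySem.Set String × Bool :=
  if c s && !(PySem.Set.contains st.1 s) then (PySem.Set.add st.1 s, true) else st

lemma pvPass_flatten (g : PySem.Dict String (List (List String))) (st : PySem.Set String × Bool) :
    pvPass g st = (pvSyms g.items).foldl (pvAstep g.contains) st := by
  show _ = List.foldl _ st (((g.items.map Prod.snd).flatten).flatten)
  rw [List.foldl_flatten, List.foldl_flatten, List.foldl_map]
  rfl

lemma pvBfold_flatten (c : String → Bool) (l : List (String × List (List String))) (u : PySem.Set String) :
    l.foldl (fun u p => p.2.foldl (fun u regla => regla.foldl (fun u s =>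
      if c s then PySem.Set.add u s else u) u) u) u = (pvSyms l).foldl (pvBstep c) u := by
  show _ = List.foldl _ u (((l.map Prod.snd).flatten).flatten)
  rw [List.foldl_flatten, List.foldl_flatten, List.foldl_map]
  rfl

lemma pvContains_add (u : PySem.Set String) (a x : String) (h : PySem.Set.contains u x = true) :
    PySem.Set.contains (PySem.Set.add u a) x = true := by
  unfold PySem.Set.add
  split_ifs with hc
  · exact h
  · have hx : x ∈ u := by simpa [PySem.Set.contains] using h
    simp [PySem.Set.contains, hx]

lemma pvContains_add_self (u : PySem.Set String) (a : String) :
    PySem.Set.contains (PySem.Set.add u a) a = true := by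
  unfold PySem.Set.add
  split_ifs with hc
  · exact hc
  · simp [PySem.Set.contains]

lemma pvFst_foldl_astep (c : String → Bool) (L : List String) :
    ∀ (u : PySem.Set String) (b : Bool),
      (L.foldl (pvAstep c) (u, b)).1 = L.foldl (pvBstep c) u := by
  induction L with
  | nil => intro u b; rfl
  | cons a L ih =>
    intro u b
    simp only [List.foldl_cons]
    by_cases hc : c a = true
    · by_cases hm : PySem.Set.contains u a = true
      · have hadd : PySem.Set.add u a = u := by unfold PySem.Set.add; rw [if_pos hm]
        simp only [pvAstep, pvBstep, hc, hm, Bool.not_true, Bool.and_false, if_true, hadd]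
        exact ih u b
      · simp only [pvAstep, pvBstep, hc, Bool.not_eq_true] at hm ⊢
        simp only [hm, Bool.not_false, Bool.and_true, if_true]
        exact ih _ _
    · simp only [Bool.not_eq_true] at hc
      simp only [pvAstep, pvBstep, hc, Bool.false_and]
      exact ih u b

lemma pvContains_foldl_bstep_mono (c : String → Bool) (L : List String) :
    ∀ (u : PySem.Set String) (x : String), PySem.Set.contains u x = true →
      PySem.Set.contains (L.foldl (pvBstep c) u) x = true := by
  induction L with
  | nil => intro u x h; exact h
  | cons a L ih =>
    intro u x h
    simp only [List.foldl_cons]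
    apply ih
    unfold pvBstep
    split_ifs
    · exact pvContains_add u a x h
    · exact h

lemma pvMem_foldl_bstep (c : String → Bool) (L : List String) :
    ∀ (u : PySem.Set String) (s : String), s ∈ L → c s = true →
      PySem.Set.contains (L.foldl (pvBstep c) u) s = true := by
  induction L with
  | nil => intro u s h; cases h
  | cons a L ih =>
    intro u s hs hc
    simp only [List.foldl_cons]
    rcases List.mem_cons.mp hs with h | h
    · subst h
      apply pvContains_foldl_bstep_mono
      unfold pvBstep
      rw [if_pos hc]
      exact pvContains_add_self u s
    · exact ih _ s h hc

lemma pvFoldl_astep_closed (c : String → Bool) (L : List String) :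
    ∀ (u : PySem.Set String) (b : Bool),
      (∀ s ∈ L, c s = true → PySem.Set.contains u s = true) →
      L.foldl (pvAstep c) (u, b) = (u, b) := by
  induction L with
  | nil => intro u b _; rfl
  | cons a L ih =>
    intro u b h
    simp only [List.foldl_cons]
    have hstep : pvAstep c (u, b) a = (u, b) := by
      unfold pvAstep
      by_cases hc : c a = true
      · have hmem : a ∈ u := by
          simpa [PySem.Set.contains] using h a List.mem_cons_self hc
        simp [hc, hmem]
      · simp only [Bool.not_eq_true] at hc
        simp [hc]
    rw [hstep]
    exact ih u b (fun s hs => h s (List.mem_cons_of_mem a hs))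

lemma pvWhile_eq (g : PySem.Dict String (List (List String))) (n : Nat) (u : PySem.Set String) :
    pvWhile g (n + 2) u = (pvSyms g.items).foldl (pvBstep g.contains) u := by
  have hfix : ∀ (w : PySem.Set String) (bb : Bool),
      (∀ s ∈ pvSyms g.items, g.contains s = true → PySem.Set.contains w s = true) →
      (pvSyms g.items).foldl (pvAstep g.contains) (w, bb) = (w, bb) :=
    fun w bb h => pvFoldl_astep_closed g.contains (pvSyms g.items) w bb h
  show pvWhile g (n + 1 + 1) u = _
  rw [pvWhile, pvPass_flatten]
  set st := (pvSyms g.items).foldl (pvAstep g.contains) (u, false) with hst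
  have h1 : st.1 = (pvSyms g.items).foldl (pvBstep g.contains) u :=
    pvFst_foldl_astep g.contains (pvSyms g.items) u false
  by_cases hb : st.2 = true
  · rw [if_pos hb, h1]
    show pvWhile g (n + 1) _ = _
    rw [pvWhile, pvPass_flatten]
    rw [hfix _ false (fun s hs hc => pvMem_foldl_bstep g.contains (pvSyms g.items) u s hs hc)]
    simp
  · rw [if_neg hb]
    exact h1

lemma pvFoldl_erase_filter (usados : PySem.Set String) (ks : List String) :
    ∀ (acc : PySem.Dict String (List (List String))),
      (ks.foldl (fun acc clave =>
        if PySem.Set.contains usados clave then acc else acc.erase clave) acc).items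
      = acc.items.filter (fun p => PySem.Set.contains usados p.1 || !(decide (p.1 ∈ ks))) := by
  induction ks with
  | nil =>
    intro acc
    simp
  | cons c ks ih =>
    intro acc
    simp only [List.foldl_cons]
    by_cases hc : PySem.Set.contains usados c = true
    · rw [if_pos hc, ih]
      have hc' : c ∈ usados := by simpa [PySem.Set.contains] using hc
      apply List.filter_congr
      intro p _
      by_cases hpc : p.1 = c
      · simp [hpc, hc']
      · simp [List.mem_cons, hpc]
    · rw [if_neg hc, ih]
      have herase : (acc.erase c).items = acc.items.filter (fun p => !(p.1 == c)) := rfl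
      rw [herase, List.filter_filter]
      have hc' : c ∉ usados := by simpa [PySem.Set.contains] using hc
      apply List.filter_congr
      intro p _
      by_cases hpc : p.1 = c
      · simp [hpc, hc']
      · simp [List.mem_cons, hpc]

lemma pvPhase3_eq (usados : PySem.Set String) (g : PySem.Dict String (List (List String))) :
    (g.keys.foldl (fun acc clave =>
      if PySem.Set.contains usados clave then acc else acc.erase clave) g).items
    = g.items.filter (fun p => PySem.Set.contains usados p.1) := by
  rw [pvFoldl_erase_filter]
  apply List.filter_congr
  intro p hp
  have hmem : p.1 ∈ g.keys := by
    simp only [PySem.Dict.keys]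
    exact List.mem_map_of_mem hp
  simp [hmem]

lemma pvFoldl_insert_overwrite (f : List (List String) → List (List String)) :
    ∀ (l pre : List (String × List (List String))) (acc : PySem.Dict String (List (List String))),
      acc.items = pre ++ l → (acc.items.map Prod.fst).Nodup →
      (l.foldl (fun acc p => acc.insert p.1 (f p.2)) acc).items
        = pre ++ l.map (fun p => (p.1, f p.2)) := by
  intro l
  induction l with
  | nil =>
    intro pre acc hitems _
    simpa using hitems
  | cons p l ih =>
    intro pre acc hitems hnd
    simp only [List.foldl_cons]
    have hpmem : p ∈ acc.items := by
      rw [hitems]; exact List.mem_append_right _ (List.mem_cons_self)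
    have hcontains : acc.contains p.1 = true := by
      simp only [PySem.Dict.contains, List.any_eq_true]
      exact ⟨p, hpmem, by simp⟩
    have hkeys : ((pre ++ p :: l).map Prod.fst).Nodup := by rw [← hitems]; exact hnd
    rw [List.map_append, List.map_cons, List.nodup_append] at hkeys
    obtain ⟨hnd_pre, hnd_cons, hdisj⟩ := hkeys
    have hpre_ne : ∀ q ∈ pre, (q.1 == p.1) = false := by
      intro q hq
      have hne : q.1 ≠ p.1 := hdisj q.1 (List.mem_map_of_mem hq) p.1 (by simp)
      simp [hne]
    have hl_ne : ∀ q ∈ l, (q.1 == p.1) = false := by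
      intro q hq
      have : p.1 ∉ l.map Prod.fst := (List.nodup_cons.mp hnd_cons).1
      have hne : q.1 ≠ p.1 := by
        intro he; exact this (he ▸ List.mem_map_of_mem hq)
      simp [hne]
    have hitems' : (acc.insert p.1 (f p.2)).items = (pre ++ [(p.1, f p.2)]) ++ l := by
      show (PySem.Dict.insert acc p.1 (f p.2)).items = _
      unfold PySem.Dict.insert
      rw [if_pos hcontains]
      show (acc.items.map fun q => if (q.1 == p.1) = true then (p.1, f p.2) else q) = _
      rw [hitems, List.map_append, List.map_cons]
      rw [List.map_congr_left (fun q hq => by rw [if_neg]; simp [hpre_ne q hq]),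
        List.map_congr_left (l := l) (fun q hq => by rw [if_neg]; simp [hl_ne q hq])]
      simp [List.map_id']
    have hnd' : ((acc.insert p.1 (f p.2)).items.map Prod.fst).Nodup := by
      rw [hitems']
      have : ((pre ++ [(p.1, f p.2)]) ++ l).map Prod.fst = (pre ++ p :: l).map Prod.fst := by
        simp
      rw [this, ← hitems]
      exact hnd
    rw [ih (pre ++ [(p.1, f p.2)]) _ hitems' hnd']
    simp

lemma pvApplyRename_insert (m : PySem.Dict String String) (clave ex : String)
    (hck : m.contains clave = false)
    (hcv : ∀ q ∈ m.items, q.2 ≠ clave) (reglas : List (List String)) :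
    pvSubstReglas clave ex (pvApplyRename m reglas)
      = pvApplyRename (m.insert clave ex) reglas := by
  unfold pvSubstReglas pvApplyRename
  rw [List.map_map]
  apply List.map_congr_left
  intro regla _
  show (regla.map fun s => m.getD s s).map (fun s => if s == clave then ex else s) = _
  rw [List.map_map]
  apply List.map_congr_left
  intro s _
  show (if (m.getD s s == clave) = true then ex else m.getD s s) = (m.insert clave ex).getD s s
  by_cases hs : s = clave
  · subst hs
    have h1 : m.getD s s = s := PySem.Dict.getD_of_not_contains m s hck
    rw [h1, PySem.Dict.getD_insert_self]
    simp
  · rw [PySem.Dict.getD_insert_of_ne m ex s hs]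
    have hne : m.getD s s ≠ clave := by
      cases hg : m.get? s with
      | none => rw [PySem.Dict.getD_of_get?_eq_none m s hg]; exact hs
      | some v =>
        rw [PySem.Dict.getD_of_get?_eq_some m s hg]
        exact hcv (s, v) (PySem.Dict.mem_items_of_get?_eq_some m hg)
    simp [hne]

lemma pvPhase1_inv (g0 : List (String × List (List String)))
    (hnd : (g0.map Prod.fst).Nodup) :
    ∀ (rest : List (String × List (List String)))
      (rep : PySem.Dict (List (List String)) String) (m : PySem.Dict String String),
      rest <:+ g0 →
      (∀ q ∈ m.items, q.1 ∉ rest.map Prod.fst ∧ q.2 ∈ g0.map Prod.fst ∧ q.2 ∉ rest.map Prod.fst) →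
      (∀ q ∈ rep.items, q.2 ∈ g0.map Prod.fst ∧ q.2 ∉ rest.map Prod.fst) →
      pvPhase1 rest (PySem.Dict.mk (pvMerged m g0)) rep
        = PySem.Dict.mk (pvMerged (rest.foldl pvGroup (rep, m)).2 g0) := by
  intro rest
  induction rest with
  | nil =>
    intro rep m _ _ _
    rfl
  | cons hd rest ih =>
    obtain ⟨clave, reglas⟩ := hd
    intro rep m hsuf hm hrep
    have hsuf' : rest <:+ g0 := (List.suffix_cons _ _).trans hsuf
    have hsub := List.Sublist.map Prod.fst (List.IsSuffix.sublist hsuf)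
    have hnd_cons : (((clave, reglas) :: rest).map Prod.fst).Nodup := hsub.nodup hnd
    have hclave_g0 : clave ∈ g0.map Prod.fst := hsub.subset (by simp)
    have hclave_not : clave ∉ rest.map Prod.fst := by
      rw [List.map_cons, List.nodup_cons] at hnd_cons
      exact hnd_cons.1
    cases hfind : rep.get? reglas with
    | none =>
      have hstep : pvPhase1 ((clave, reglas) :: rest) (PySem.Dict.mk (pvMerged m g0)) rep
          = pvPhase1 rest (PySem.Dict.mk (pvMerged m g0)) (rep.insert reglas clave) := by
        rw [pvPhase1]
        rw [hfind]
      have hgroup : ((clave, reglas) :: rest).foldl pvGroup (rep, m)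
          = rest.foldl pvGroup (rep.insert reglas clave, m) := by
        simp only [List.foldl_cons, pvGroup, hfind]
      rw [hstep, hgroup]
      apply ih (rep.insert reglas clave) m hsuf'
      · intro q hq
        obtain ⟨h1, h2, h3⟩ := hm q hq
        refine ⟨fun hx => h1 ?_, h2, fun hx => h3 ?_⟩ <;> simp [hx]
      · intro q hq
        rcases (PySem.Dict.mem_items_insert rep reglas clave q).mp hq with h | ⟨h, _⟩
        · subst h
          exact ⟨hclave_g0, hclave_not⟩
        · obtain ⟨h2, h3⟩ := hrep q h
          exact ⟨h2, fun hx => h3 (by simp [hx])⟩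
    | some ex =>
      have hmck : m.contains clave = false := by
        by_contra hcc
        simp only [Bool.not_eq_false, PySem.Dict.contains, List.any_eq_true] at hcc
        obtain ⟨q, hq, hqe⟩ := hcc
        have := (hm q hq).1
        rw [show q.1 = clave from by simpa using hqe] at this
        exact this (by simp)
      have hmcv : ∀ q ∈ m.items, q.2 ≠ clave := by
        intro q hq he
        have := (hm q hq).2.2
        rw [he] at this
        exact this (by simp)
      have hexmem : (reglas, ex) ∈ rep.items := PySem.Dict.mem_items_of_get?_eq_some rep hfind
      obtain ⟨hex_g0, hex_not⟩ := hrep _ hexmem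
      -- the in-place substitution sweep rewrites every value
      have hndG : ((PySem.Dict.mk (pvMerged m g0)).items.map Prod.fst).Nodup := by
        show ((pvMerged m g0).map Prod.fst).Nodup
        have he : (pvMerged m g0).map Prod.fst
            = (g0.filter (fun p => !(m.contains p.1))).map Prod.fst := by
          unfold pvMerged
          rw [List.map_map]
          rfl
        rw [he]
        exact (List.Sublist.map Prod.fst List.filter_sublist).nodup hnd
      have hover := pvFoldl_insert_overwrite (pvSubstReglas clave ex)
        (PySem.Dict.mk (pvMerged m g0)).items []
        (PySem.Dict.mk (pvMerged m g0)) (by simp) hndG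
      have hstep : pvPhase1 ((clave, reglas) :: rest) (PySem.Dict.mk (pvMerged m g0)) rep
          = pvPhase1 rest
              (((PySem.Dict.mk (pvMerged m g0)).items.foldl
                (fun acc p => acc.insert p.1 (pvSubstReglas clave ex p.2))
                (PySem.Dict.mk (pvMerged m g0))).erase clave) rep := by
        rw [pvPhase1]
        rw [hfind]
      have hgroup : ((clave, reglas) :: rest).foldl pvGroup (rep, m)
          = rest.foldl pvGroup (rep, m.insert clave ex) := by
        simp only [List.foldl_cons, pvGroup, hfind]
      rw [hstep, hgroup]
      have herase :
          (((PySem.Dict.mk (pvMerged m g0)).items.foldl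
            (fun acc p => acc.insert p.1 (pvSubstReglas clave ex p.2))
            (PySem.Dict.mk (pvMerged m g0))).erase clave)
          = PySem.Dict.mk (pvMerged (m.insert clave ex) g0) := by
        apply PySem.Dict.ext
        show List.filter _ _ = _
        have hitems : ((PySem.Dict.mk (pvMerged m g0)).items.foldl
            (fun acc p => acc.insert p.1 (pvSubstReglas clave ex p.2))
            (PySem.Dict.mk (pvMerged m g0))).items
            = (pvMerged m g0).map (fun p => (p.1, pvSubstReglas clave ex p.2)) := by
          simpa using hover
        rw [hitems]
        show ((pvMerged m g0).map (fun p => (p.1, pvSubstReglas clave ex p.2))).filter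
            (fun p => !(p.1 == clave)) = pvMerged (m.insert clave ex) g0
        unfold pvMerged
        rw [List.map_map]
        have hmapeq : (g0.filter (fun p => !(m.contains p.1))).map
            ((fun p => (p.1, pvSubstReglas clave ex p.2)) ∘ (fun p => (p.1, pvApplyRename m p.2)))
            = (g0.filter (fun p => !(m.contains p.1))).map
              (fun p => (p.1, pvApplyRename (m.insert clave ex) p.2)) := by
          apply List.map_congr_left
          intro p _
          show (p.1, pvSubstReglas clave ex (pvApplyRename m p.2)) = _
          rw [pvApplyRename_insert m clave ex hmck hmcv]
        rw [hmapeq, List.filter_map, List.filter_filter]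
        congr 1
        apply List.filter_congr
        intro p _
        show ((!(p.1 == clave)) && (!(m.contains p.1))) = !((m.insert clave ex).contains p.1)
        rw [PySem.Dict.contains_insert]
        simp
      rw [herase]
      apply ih rep (m.insert clave ex) hsuf'
      · intro q hq
        rcases (PySem.Dict.mem_items_insert m clave ex q).mp hq with h | ⟨h, _⟩
        · subst h
          exact ⟨hclave_not, hex_g0, fun hx => hex_not (by simp [hx])⟩
        · obtain ⟨h1, h2, h3⟩ := hm q h
          exact ⟨fun hx => h1 (by simp [hx]), h2, fun hx => h3 (by simp [hx])⟩
      · intro q hq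
        obtain ⟨h2, h3⟩ := hrep q hq
        exact ⟨h2, fun hx => h3 (by simp [hx])⟩

lemma pvMerged_empty (l : List (String × List (List String))) :
    pvMerged PySem.Dict.empty l = l := by
  unfold pvMerged pvApplyRename
  rw [show (fun s : String => (PySem.Dict.empty : PySem.Dict String String).getD s s)
      = fun s => s from rfl]
  rw [show (fun p : String × List (List String) =>
      !((PySem.Dict.empty : PySem.Dict String String).contains p.1)) = fun _ => true from rfl]
  simp

lemma pvPhase1_eq (d : PySem.Dict String (List (List String)))
    (hnd : (d.items.map Prod.fst).Nodup) :
    pvPhase1 d.items d PySem.Dict.empty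
      = PySem.Dict.mk (pvMerged (d.items.foldl pvGroup (PySem.Dict.empty, PySem.Dict.empty)).2 d.items) := by
  have h := pvPhase1_inv d.items hnd d.items PySem.Dict.empty PySem.Dict.empty
    (List.suffix_refl _) (by intro q hq; cases hq) (by intro q hq; cases hq)
  have e : PySem.Dict.mk (pvMerged PySem.Dict.empty d.items) = d := by
    rw [pvMerged_empty]
  rw [e] at h
  exact h

-- ===== VERDICT (by name: the statement is the Claim_ definition above) =====
theorem simplificar_gramatica_spec : Claim_equal_simplificar_gramatica := by
  intro init_symbol gramatica _hdom
  show simplificar_gramatica init_symbol gramatica = simplificar_gramatica_alt init_symbol gramatica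
  simp only [simplificar_gramatica, simplificar_gramatica_alt]
  have hnd : ((PySem.Dict.ofList gramatica).items.map Prod.fst).Nodup :=
    PySem.Dict.nodup_keys_ofList gramatica
  rw [pvPhase1_eq _ hnd]
  rw [pvWhile_eq, pvBfold_flatten, pvPhase3_eq]
  rfl
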